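-- pv_equiv track=rewrite | github.com/loadingcloud003/PyCharles | PyCharles.extension/PyCharles.tab/Automation.panel/ModelComparison.pushbutton/script.py | combine_comparison_results
-- ===== SOURCE A (Python) =====
-- def combine_comparison_results(xyz_results, param_results, element_results):
--     """
--     Combines all comparison results by element id.
--     Appends all results, then groups by element id, concatenating compare results by ','.
--     If any compare result for an element is 'element deleted', just show 'element deleted'.
--     If any compare result for an element is 'new element added', just show 'new element added'.
--     Returns a list of dicts with keys:
--     'previous_element_id', 'current_element_id', 'previous_family_and_type', 'current_family_and_type', 'previous_category', 'current_category', 'compare_result', 'compare_date'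
--     """
--     from collections import defaultdict
--     all_results = []
--     # Append all results
--     for row in xyz_results:
--         all_results.append(row)
--     for row in param_results:
--         all_results.append(row)
--     for row in element_results:
--         all_results.append(row)
--     # Group by element id (use previous_element_id or current_element_id)
--     grouped = defaultdict(list)
--     for row in all_results:
--         key = row.get('previous_element_id') or row.get('current_element_id')
--         grouped[key].append(row)
--     # Build final results
--     results = []
--     for group_rows in grouped.values():
--         # Merge fields, prefer non-empty, prefer previous_*
--         merged = {
--             'previous_element_id': '',
--             'current_element_id': '',
--             'previous_family_and_type': '',
--             'current_family_and_type': '',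
--             'previous_category': '',
--             'current_category': '',
--             'compare_result': '',
--             'compare_date': ''
--         }
--         compare_results = []
--         for row in group_rows:
--             for k in merged:
--                 if not merged[k] and row.get(k):
--                     merged[k] = row.get(k)
--             compare_results.append(row.get('compare_result', ''))
--         # If any compare_result is 'element deleted', just show that
--         if 'element deleted' in compare_results:
--             merged['compare_result'] = 'element deleted'
--         # If any compare_result is 'new element added', just show that (unless deleted)
--         elif 'new element added' in compare_results:
--             merged['compare_result'] = 'new element added'
--         else:
--             merged['compare_result'] = ', '.join([r for r in compare_results if r])
--         results.append(merged)
--     return results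
-- ===== SOURCE B (Python) =====
-- _FIELDS = ('previous_element_id', 'current_element_id',
--            'previous_family_and_type', 'current_family_and_type',
--            'previous_category', 'current_category', 'compare_date')
--
--
-- def combine_comparison_results(xyz_results, param_results, element_results):
--     # Single streaming pass: per-key state (field values, deleted flag, added flag, parts)
--     acc = {}
--     for source in (xyz_results, param_results, element_results):
--         for row in source:
--             key = row.get('previous_element_id') or row.get('current_element_id')
--             vals, deleted, added, parts = acc.get(key, (('',) * 7, False, False, ()))
--             vals = tuple(v if v else (row.get(f) or '') for v, f in zip(vals, _FIELDS))
--             cr = row.get('compare_result', '')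
--             deleted = deleted or cr == 'element deleted'
--             added = added or cr == 'new element added'
--             if cr:
--                 parts = parts + (cr,)
--             acc[key] = (vals, deleted, added, parts)
--     out = []
--     for vals, deleted, added, parts in acc.values():
--         if deleted:
--             cr = 'element deleted'
--         elif added:
--             cr = 'new element added'
--         else:
--             cr = ', '.join(parts)
--         out.append({
--             'previous_element_id': vals[0],
--             'current_element_id': vals[1],
--             'previous_family_and_type': vals[2],
--             'current_family_and_type': vals[3],
--             'previous_category': vals[4],
--             'current_category': vals[5],
--             'compare_result': cr,
--             'compare_date': vals[6],
--         })
--     return out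
-- ===== Notes on version B (the rewrite author's own statement) =====
-- stated objective: alternative
-- what changed: A concatenates the three lists, builds a defaultdict of row groups, then re-scans each group merging fields and collecting compare_results; B makes one streaming pass that folds every row directly into a per-key state (first-non-empty field values, deleted/added flags, non-empty result parts) and finalizes each state at the end.
import Mathlib
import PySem

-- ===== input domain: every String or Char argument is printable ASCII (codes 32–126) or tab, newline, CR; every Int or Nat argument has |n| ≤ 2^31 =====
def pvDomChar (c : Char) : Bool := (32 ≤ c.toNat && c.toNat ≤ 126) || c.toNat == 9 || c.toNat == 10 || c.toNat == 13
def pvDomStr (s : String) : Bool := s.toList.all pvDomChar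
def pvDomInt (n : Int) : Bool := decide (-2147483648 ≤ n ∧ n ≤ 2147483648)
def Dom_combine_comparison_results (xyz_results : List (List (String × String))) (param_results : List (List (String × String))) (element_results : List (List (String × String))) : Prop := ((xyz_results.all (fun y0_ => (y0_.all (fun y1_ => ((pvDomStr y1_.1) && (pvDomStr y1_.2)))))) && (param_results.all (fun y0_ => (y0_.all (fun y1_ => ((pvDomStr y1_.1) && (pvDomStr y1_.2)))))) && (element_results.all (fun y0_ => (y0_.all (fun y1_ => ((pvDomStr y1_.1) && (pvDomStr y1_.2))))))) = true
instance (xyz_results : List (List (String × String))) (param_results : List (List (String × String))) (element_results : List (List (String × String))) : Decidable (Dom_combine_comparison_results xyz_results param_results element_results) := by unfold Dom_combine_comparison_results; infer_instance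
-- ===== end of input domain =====

-- B replaces A's concatenate-then-group-then-merge pipeline by a single streaming pass
-- that folds each row directly into a per-key state (fields, deleted/added flags, result parts).


-- ===== PORT A =====
-- row.get(k): a row is a dict given as an association list (first match wins)
def pvRGet (row : List (String × String)) (k : String) : Option String :=
  (row.find? (fun p => p.1 == k)).map (·.2)

-- row.get(k, '') and (row.get(k) or ''): both collapse None and '' to ''
def pvRGetD (row : List (String × String)) (k : String) : String :=
  (pvRGet row k).getD ""

-- Python truthiness of an Optional[str]
def pvTruthy (o : Option String) : Bool :=
  match o with
  | some s => s ≠ ""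
  | none => false

-- key = row.get('previous_element_id') or row.get('current_element_id')
def pvKey (row : List (String × String)) : Option String :=
  if pvTruthy (pvRGet row "previous_element_id") then pvRGet row "previous_element_id"
  else pvRGet row "current_element_id"

-- A's initial 'merged' dict literal
def pvMerged0 : PySem.Dict String String :=
  ⟨[("previous_element_id", ""), ("current_element_id", ""),
    ("previous_family_and_type", ""), ("current_family_and_type", ""),
    ("previous_category", ""), ("current_category", ""),
    ("compare_result", ""), ("compare_date", "")]⟩

-- A's inner loop: for k in merged: if not merged[k] and row.get(k): merged[k] = row.get(k)
def pvMergeRowA (row : List (String × String)) (m : PySem.Dict String String) :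
    PySem.Dict String String :=
  m.keys.foldl
    (fun m k =>
      if m.getD k "" = "" ∧ pvTruthy (pvRGet row k) then m.insert k ((pvRGet row k).getD "")
      else m) m

-- A's per-group body: merge fields, collect compare_results, pick the final compare_result
def pvGroupA (group_rows : List (List (String × String))) : List (String × String) :=
  let st := group_rows.foldl
    (fun (st : PySem.Dict String String × List String) row =>
      (pvMergeRowA row st.1, st.2 ++ [(pvRGet row "compare_result").getD ""]))
    (pvMerged0, ([] : List String))
  (if st.2.contains "element deleted" then
      st.1.insert "compare_result" "element deleted"
    else if st.2.contains "new element added" then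
      st.1.insert "compare_result" "new element added"
    else
      st.1.insert "compare_result"
        (PySem.Str.join ", " (st.2.filter (fun r => r ≠ "")))).items

-- grouped[key].append(row) on the defaultdict
def pvGStepA (d : PySem.Dict (Option String) (List (List (String × String))))
    (row : List (String × String)) : PySem.Dict (Option String) (List (List (String × String))) :=
  d.insert (pvKey row) (d.getD (pvKey row) [] ++ [row])

def combine_comparison_results (xyz_results : List (List (String × String))) (param_results : List (List (String × String))) (element_results : List (List (String × String))) : List (List (String × String)) :=
  let all_results := xyz_results.foldl (fun acc row => acc ++ [row]) ([] : List (List (String × String)))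
  let all_results := param_results.foldl (fun acc row => acc ++ [row]) all_results
  let all_results := element_results.foldl (fun acc row => acc ++ [row]) all_results
  let grouped : PySem.Dict (Option String) (List (List (String × String))) :=
    all_results.foldl pvGStepA PySem.Dict.empty
  grouped.values.foldl (fun results group_rows => results ++ [pvGroupA group_rows]) []

-- ===== PORT B =====
abbrev pvV7 := String × String × String × String × String × String × String
abbrev pvState := pvV7 × Bool × Bool × List String

-- v if v else (row.get(f) or '')
def pvFillK (k : String) (v : String) (row : List (String × String)) : String :=
  if v = "" then pvRGetD row k else v

-- the zip(vals, _FIELDS) comprehension, componentwise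
def pvFill (vs : pvV7) (row : List (String × String)) : pvV7 :=
  (pvFillK "previous_element_id" vs.1 row,
   pvFillK "current_element_id" vs.2.1 row,
   pvFillK "previous_family_and_type" vs.2.2.1 row,
   pvFillK "current_family_and_type" vs.2.2.2.1 row,
   pvFillK "previous_category" vs.2.2.2.2.1 row,
   pvFillK "current_category" vs.2.2.2.2.2.1 row,
   pvFillK "compare_date" vs.2.2.2.2.2.2 row)

def pvInit : pvState := (("", "", "", "", "", "", ""), false, false, [])

-- one streaming update of a per-key state with one row
def pvStep (st : pvState) (row : List (String × String)) : pvState :=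
  let vals := pvFill st.1 row
  let cr := pvRGetD row "compare_result"
  (vals, st.2.1 || (cr == "element deleted"), st.2.2.1 || (cr == "new element added"),
   if cr ≠ "" then st.2.2.2 ++ [cr] else st.2.2.2)

-- build the output record of one key from its final state
def pvFinalize (st : pvState) : List (String × String) :=
  let cr :=
    if st.2.1 then "element deleted"
    else if st.2.2.1 then "new element added"
    else PySem.Str.join ", " st.2.2.2
  [("previous_element_id", st.1.1), ("current_element_id", st.1.2.1),
   ("previous_family_and_type", st.1.2.2.1), ("current_family_and_type", st.1.2.2.2.1),
   ("previous_category", st.1.2.2.2.2.1), ("current_category", st.1.2.2.2.2.2.1),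
   ("compare_result", cr), ("compare_date", st.1.2.2.2.2.2.2)]

-- acc[key] = step(acc.get(key, init), row)
def pvBStep (acc : PySem.Dict (Option String) pvState) (row : List (String × String)) :
    PySem.Dict (Option String) pvState :=
  acc.insert (pvKey row) (pvStep (acc.getD (pvKey row) pvInit) row)

def combine_comparison_results_alt (xyz_results : List (List (String × String))) (param_results : List (List (String × String))) (element_results : List (List (String × String))) : List (List (String × String)) :=
  let acc : PySem.Dict (Option String) pvState :=
    [xyz_results, param_results, element_results].foldl
      (fun acc source => source.foldl pvBStep acc) PySem.Dict.empty
  acc.values.map pvFinalize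

-- ===== PRECONDITION & SPEC =====
def Spec_combine_comparison_results (xyz_results : List (List (String × String))) (param_results : List (List (String × String))) (element_results : List (List (String × String))) (out : List (List (String × String))) : Prop := out = combine_comparison_results_alt xyz_results param_results element_results
instance (xyz_results : List (List (String × String))) (param_results : List (List (String × String))) (element_results : List (List (String × String))) (out : List (List (String × String))) : Decidable (Spec_combine_comparison_results xyz_results param_results element_results out) := by unfold Spec_combine_comparison_results; infer_instance

-- ===== CLAIM (what is proved, stated in full; the proofs are below) =====
def Claim_equal_combine_comparison_results : Prop := ∀ (xyz_results : List (List (String × String))) (param_results : List (List (String × String))) (element_results : List (List (String × String))), Dom_combine_comparison_results xyz_results param_results element_results → Spec_combine_comparison_results xyz_results param_results element_results (combine_comparison_results xyz_results param_results element_results)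

-- ===== LEMMAS AND PROOFS =====

-- shorthand: the compare_result of a row
def pvCR (row : List (String × String)) : String := pvRGetD row "compare_result"

-- B's state for a whole group of rows
def pvG (rows : List (List (String × String))) : pvState := rows.foldl pvStep pvInit

-- the dict of per-key B-states corresponding to A's dict of per-key row groups
def pvMapG (d : PySem.Dict (Option String) (List (List (String × String)))) :
    PySem.Dict (Option String) pvState :=
  ⟨d.items.map (fun p => (p.1, pvG p.2))⟩

theorem pvTruthy_false_getD {o : Option String} (h : pvTruthy o = false) : o.getD "" = "" := by
  cases o with
  | none => rfl
  | some s => simpa [pvTruthy] using h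

theorem pvMapG_get? (d : PySem.Dict (Option String) (List (List (String × String))))
    (k : Option String) : (pvMapG d).get? k = (d.get? k).map pvG := by
  obtain ⟨l⟩ := d
  induction l with
  | nil => rfl
  | cons hd tl ih =>
      rw [show pvMapG ⟨hd :: tl⟩ = ⟨(hd.1, pvG hd.2) :: tl.map (fun p => (p.1, pvG p.2))⟩ from rfl,
          PySem.Dict.get?_mk_cons, PySem.Dict.get?_mk_cons]
      by_cases h : (hd.1 == k) = true
      · rw [if_pos h, if_pos h]; rfl
      · rw [if_neg h, if_neg h]; exact ih

theorem pvMapG_contains (d : PySem.Dict (Option String) (List (List (String × String))))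
    (k : Option String) : (pvMapG d).contains k = d.contains k := by
  rw [PySem.Dict.contains_eq_isSome_get?, PySem.Dict.contains_eq_isSome_get?, pvMapG_get?]
  cases d.get? k <;> rfl

theorem pvMapG_insert (d : PySem.Dict (Option String) (List (List (String × String))))
    (k : Option String) (v : List (List (String × String))) :
    (pvMapG d).insert k (pvG v) = pvMapG (d.insert k v) := by
  apply PySem.Dict.ext
  by_cases h : d.contains k = true
  · rw [PySem.Dict.items_insert_of_contains _ _ ((pvMapG_contains d k).trans h),
        show (pvMapG d).items = d.items.map (fun p => (p.1, pvG p.2)) from rfl,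
        show (pvMapG (d.insert k v)).items
          = (d.insert k v).items.map (fun p => (p.1, pvG p.2)) from rfl,
        PySem.Dict.items_insert_of_contains _ _ h, List.map_map, List.map_map]
    refine List.map_congr_left ?_
    intro p _
    by_cases hp : (p.1 == k) = true
    · simp [Function.comp, hp]
    · simp [Function.comp, hp]
  · have h' : d.contains k = false := by simpa using h
    rw [PySem.Dict.items_insert_of_not_contains _ _ ((pvMapG_contains d k).trans h'),
        show (pvMapG d).items = d.items.map (fun p => (p.1, pvG p.2)) from rfl,
        show (pvMapG (d.insert k v)).items
          = (d.insert k v).items.map (fun p => (p.1, pvG p.2)) from rfl,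
        PySem.Dict.items_insert_of_not_contains _ _ h', List.map_append]
    rfl

theorem pvMapG_values (d : PySem.Dict (Option String) (List (List (String × String)))) :
    (pvMapG d).values = d.values.map pvG := by
  simp [pvMapG, PySem.Dict.values, List.map_map, Function.comp]

-- the streaming dict tracks exactly the per-group B-state of A's grouping dict
theorem pvL1 (rows : List (List (String × String)))
    (d : PySem.Dict (Option String) (List (List (String × String)))) :
    rows.foldl pvBStep (pvMapG d) = pvMapG (rows.foldl pvGStepA d) := by
  induction rows generalizing d with
  | nil => rfl
  | cons r rows ih =>
      have hstep : pvBStep (pvMapG d) r = pvMapG (pvGStepA d r) := by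
        unfold pvBStep pvGStepA
        rw [PySem.Dict.getD_eq_get?_getD, PySem.Dict.getD_eq_get?_getD, pvMapG_get?]
        cases hd : d.get? (pvKey r) with
        | none =>
            have h1 : pvStep pvInit r = pvG ([] ++ [r]) := rfl
            simp only [Option.map_none, Option.getD_none, h1]
            exact pvMapG_insert d (pvKey r) ([] ++ [r])
        | some g =>
            have h1 : pvStep (pvG g) r = pvG (g ++ [r]) := by
              simp [pvG, List.foldl_append]
            simp only [Option.map_some, Option.getD_some, h1]
            exact pvMapG_insert d (pvKey r) (g ++ [r])
      rw [List.foldl_cons, List.foldl_cons, hstep, ih]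

-- one pass of A's field-merging key loop, characterised on the items list
theorem pvMergeStep_items (row : List (String × String)) :
    ∀ (ks : List String), ks.Nodup → ∀ (m : PySem.Dict String String), m.keys.Nodup →
    (∀ k ∈ ks, m.contains k = true) →
    (ks.foldl
      (fun m k =>
        if m.getD k "" = "" ∧ pvTruthy (pvRGet row k) then m.insert k ((pvRGet row k).getD "")
        else m) m).items
    = m.items.map (fun p => if p.1 ∈ ks then (p.1, pvFillK p.1 p.2 row) else p) := by
  intro ks
  induction ks with
  | nil => intro _ m _ _; simp
  | cons k ks ih =>
      intro hks m hnd hsub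
      obtain ⟨hknotks, hksnd⟩ := List.nodup_cons.mp hks
      have hkm : m.contains k = true := hsub k List.mem_cons_self
      have hstep_items :
          (if m.getD k "" = "" ∧ pvTruthy (pvRGet row k) then m.insert k ((pvRGet row k).getD "")
           else m).items
          = m.items.map (fun p => if p.1 = k then (p.1, pvFillK p.1 p.2 row) else p) := by
        by_cases hc : m.getD k "" = "" ∧ pvTruthy (pvRGet row k) = true
        · rw [if_pos hc, PySem.Dict.items_insert_of_contains _ _ hkm]
          refine List.map_congr_left ?_
          rintro ⟨p1, p2⟩ hp
          by_cases hpk : p1 = k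
          · subst hpk
            have hval : m.getD p1 "" = p2 := PySem.Dict.getD_of_mem_items m hp hnd ""
            have hp2 : p2 = "" := by rw [← hval]; exact hc.1
            simp [pvFillK, hp2, pvRGetD]
          · simp [hpk, beq_iff_eq]
        · rw [if_neg hc]
          have hid : m.items.map (fun p => if p.1 = k then (p.1, pvFillK p.1 p.2 row) else p)
              = m.items := by
            have h1 : ∀ p ∈ m.items,
                (if p.1 = k then (p.1, pvFillK p.1 p.2 row) else p) = id p := by
              rintro ⟨p1, p2⟩ hp
              by_cases hpk : p1 = k
              · subst hpk
                have hval : m.getD p1 "" = p2 := PySem.Dict.getD_of_mem_items m hp hnd ""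
                by_cases hp2 : p2 = ""
                · have hnt : pvTruthy (pvRGet row p1) = false := by
                    by_contra hh
                    exact hc ⟨by rw [hval, hp2], by simpa using hh⟩
                  have hg : pvRGetD row p1 = "" := pvTruthy_false_getD hnt
                  simp [pvFillK, hp2, hg]
                · simp [pvFillK, hp2]
              · simp [hpk]
            rw [List.map_congr_left h1, List.map_id]
          exact hid.symm
      have hkeys :
          (if m.getD k "" = "" ∧ pvTruthy (pvRGet row k) then m.insert k ((pvRGet row k).getD "")
           else m).keys = m.keys := by
        simp only [PySem.Dict.keys, hstep_items, List.map_map]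
        refine List.map_congr_left ?_
        rintro ⟨p1, p2⟩ hp
        by_cases hpk : p1 = k <;> simp [Function.comp, hpk]
      rw [List.foldl_cons,
          ih hksnd _ (by rw [hkeys]; exact hnd)
            (by
              intro k' hk'
              have h2 : k' ∈ m.keys :=
                (PySem.Dict.contains_iff_mem_keys _ _).mp (hsub k' (List.mem_cons_of_mem _ hk'))
              exact (PySem.Dict.contains_iff_mem_keys _ _).mpr (by rw [hkeys]; exact h2)),
          hstep_items, List.map_map]
      refine List.map_congr_left ?_
      rintro ⟨p1, p2⟩ hp
      by_cases hpk : p1 = k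
      · subst hpk
        simp [Function.comp, List.mem_cons, hknotks]
      · simp [Function.comp, List.mem_cons, hpk]

-- A's whole key loop for one row fills every field once
theorem pvMergeRowA_items (row : List (String × String)) (m : PySem.Dict String String)
    (hnd : m.keys.Nodup) :
    (pvMergeRowA row m).items = m.items.map (fun p => (p.1, pvFillK p.1 p.2 row)) := by
  unfold pvMergeRowA
  rw [pvMergeStep_items row m.keys hnd m hnd
      (fun k hk => (PySem.Dict.contains_iff_mem_keys _ _).mpr hk)]
  refine List.map_congr_left ?_
  rintro ⟨p1, p2⟩ hp
  have hmem : p1 ∈ m.keys := by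
    simp only [PySem.Dict.keys]
    exact List.mem_map_of_mem hp
  simp [hmem]

theorem pvMergeRowA_keys (row : List (String × String)) (m : PySem.Dict String String)
    (hnd : m.keys.Nodup) : (pvMergeRowA row m).keys = m.keys := by
  simp only [PySem.Dict.keys, pvMergeRowA_items row m hnd, List.map_map]
  refine List.map_congr_left ?_
  rintro ⟨p1, p2⟩ hp
  rfl

-- A's field merge over a whole group, per entry
theorem pvMergeFold_items :
    ∀ (rows : List (List (String × String))) (m : PySem.Dict String String), m.keys.Nodup →
    (rows.foldl (fun m row => pvMergeRowA row m) m).items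
      = m.items.map (fun p => (p.1, rows.foldl (fun v row => pvFillK p.1 v row) p.2)) := by
  intro rows
  induction rows with
  | nil =>
      intro m _
      simp
  | cons r rows ih =>
      intro m hnd
      rw [List.foldl_cons, ih _ (by rw [pvMergeRowA_keys r m hnd]; exact hnd),
          pvMergeRowA_items r m hnd, List.map_map]
      refine List.map_congr_left ?_
      rintro ⟨p1, p2⟩ hp
      rfl

-- B's streaming state over a group, componentwise
theorem pvStepFold :
    ∀ (rows : List (List (String × String))) (st : pvState),
    rows.foldl pvStep st
      = (rows.foldl pvFill st.1,
         st.2.1 || rows.any (fun r => pvCR r == "element deleted"),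
         st.2.2.1 || rows.any (fun r => pvCR r == "new element added"),
         st.2.2.2 ++ (rows.map pvCR).filter (fun s => s ≠ "")) := by
  intro rows
  induction rows with
  | nil => intro st; simp
  | cons r rows ih =>
      intro st
      rw [List.foldl_cons, ih]
      by_cases hcr : pvRGetD r "compare_result" = ""
      · simp [pvStep, pvCR, hcr]
      · simp [pvStep, pvCR, hcr, Bool.or_assoc, List.append_assoc]

theorem pvFillFold :
    ∀ (rows : List (List (String × String))) (vs : pvV7),
    rows.foldl pvFill vs
      = (rows.foldl (fun v r => pvFillK "previous_element_id" v r) vs.1,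
         rows.foldl (fun v r => pvFillK "current_element_id" v r) vs.2.1,
         rows.foldl (fun v r => pvFillK "previous_family_and_type" v r) vs.2.2.1,
         rows.foldl (fun v r => pvFillK "current_family_and_type" v r) vs.2.2.2.1,
         rows.foldl (fun v r => pvFillK "previous_category" v r) vs.2.2.2.2.1,
         rows.foldl (fun v r => pvFillK "current_category" v r) vs.2.2.2.2.2.1,
         rows.foldl (fun v r => pvFillK "compare_date" v r) vs.2.2.2.2.2.2) := by
  intro rows
  induction rows with
  | nil => intro vs; rfl
  | cons r rows ih =>
      intro vs
      rw [List.foldl_cons, ih]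
      rfl

theorem pvContains_map (rows : List (List (String × String))) (a : String) :
    (rows.map pvCR).contains a = rows.any (fun r => pvCR r == a) := by
  induction rows with
  | nil => rfl
  | cons r rows ih =>
      rw [List.map_cons, List.contains_cons, List.any_cons, ih]
      congr 1
      by_cases h : a = pvCR r
      · subst h; simp
      · simp [h, Ne.symm h]

-- the per-group equivalence: A's merge of a group equals B's finalised streaming state
theorem pvGroupA_eq (rows : List (List (String × String))) :
    pvGroupA rows = pvFinalize (pvG rows) := by
  simp only [pvGroupA]
  rw [PySem.List.foldl_prod_mk (fun m row => pvMergeRowA row m)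
      (fun l row => l ++ [(pvRGet row "compare_result").getD ""]) rows pvMerged0 [],
      PySem.List.foldl_append_singleton_eq_map, List.nil_append]
  have hmap : rows.map (fun row => (pvRGet row "compare_result").getD "") = rows.map pvCR := rfl
  rw [hmap]
  have hM : (rows.foldl (fun m row => pvMergeRowA row m) pvMerged0)
      = ⟨[("previous_element_id", rows.foldl (fun v row => pvFillK "previous_element_id" v row) ""),
          ("current_element_id", rows.foldl (fun v row => pvFillK "current_element_id" v row) ""),
          ("previous_family_and_type", rows.foldl (fun v row => pvFillK "previous_family_and_type" v row) ""),
          ("current_family_and_type", rows.foldl (fun v row => pvFillK "current_family_and_type" v row) ""),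
          ("previous_category", rows.foldl (fun v row => pvFillK "previous_category" v row) ""),
          ("current_category", rows.foldl (fun v row => pvFillK "current_category" v row) ""),
          ("compare_result", rows.foldl (fun v row => pvFillK "compare_result" v row) ""),
          ("compare_date", rows.foldl (fun v row => pvFillK "compare_date" v row) "")]⟩ := by
    apply PySem.Dict.ext
    rw [pvMergeFold_items rows pvMerged0 (by decide)]
    rfl
  rw [hM, pvContains_map, pvContains_map]
  simp only [pvG, pvStepFold, pvFillFold, pvInit, pvFinalize, Bool.false_or, List.nil_append]
  have hc : (⟨[("previous_element_id", rows.foldl (fun v row => pvFillK "previous_element_id" v row) ""),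
          ("current_element_id", rows.foldl (fun v row => pvFillK "current_element_id" v row) ""),
          ("previous_family_and_type", rows.foldl (fun v row => pvFillK "previous_family_and_type" v row) ""),
          ("current_family_and_type", rows.foldl (fun v row => pvFillK "current_family_and_type" v row) ""),
          ("previous_category", rows.foldl (fun v row => pvFillK "previous_category" v row) ""),
          ("current_category", rows.foldl (fun v row => pvFillK "current_category" v row) ""),
          ("compare_result", rows.foldl (fun v row => pvFillK "compare_result" v row) ""),
          ("compare_date", rows.foldl (fun v row => pvFillK "compare_date" v row) "")]⟩ :
        PySem.Dict String String).contains "compare_result" = true := by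
    simp [PySem.Dict.contains_mk]
  split_ifs with h1 h2 <;>
    · rw [PySem.Dict.items_insert_of_contains _ _ hc]
      simp

theorem combine_comparison_results_spec : Claim_equal_combine_comparison_results := by
  intro xyz_results param_results element_results _
  unfold Spec_combine_comparison_results
  simp only [combine_comparison_results, combine_comparison_results_alt]
  rw [PySem.List.foldl_append_singleton, PySem.List.foldl_append_singleton,
      PySem.List.foldl_append_singleton, List.nil_append,
      PySem.List.foldl_append_singleton_eq_map, List.nil_append]
  simp only [List.foldl_cons, List.foldl_nil]
  rw [← List.foldl_append, ← List.foldl_append,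
      show (PySem.Dict.empty : PySem.Dict (Option String) pvState)
        = pvMapG PySem.Dict.empty from rfl,
      pvL1, pvMapG_values, List.map_map, ← List.append_assoc]
  refine (List.map_congr_left ?_).symm
  intro g _
  simp only [Function.comp]
  exact (pvGroupA_eq g).symm
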